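-- pv_equiv track=rewrite | github.com/GoogleCloudPlatform/cxlint | src/common.py | clean_display_name
-- ===== SOURCE A (Python) =====
-- def clean_display_name(display_name: str):
--     """Replace cspecial haracters from map for the given display name."""
--     patterns = {
--         "%22": '"',
--         "%23": "#",
--         "%24": "$",
--         "%26": "&",
--         "%27": "'",
--         "%28": "(",
--         "%29": ")",
--         "%2c": ",",
--         "%2f": "/",
--         "%3a": ":",
--         "%3c": "<",
--         "%3d": "=",
--         "%3e": ">",
--         "%3f": "?",
--         "%5b": "[",
--         "%5d": "]",
--         "%e2%80%9c": "“",
--         "%e2%80%9d": "”",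
--     }
--
--     for key, value in patterns.items():
--         if key in display_name:
--             display_name = display_name.replace(key, value)
--
--     return display_name
-- ===== SOURCE B (Python) =====
-- def clean_display_name(display_name: str):
--     """Replace special characters from map for the given display name."""
--     patterns = {
--         "%22": '"',
--         "%23": "#",
--         "%24": "$",
--         "%26": "&",
--         "%27": "'",
--         "%28": "(",
--         "%29": ")",
--         "%2c": ",",
--         "%2f": "/",
--         "%3a": ":",
--         "%3c": "<",
--         "%3d": "=",
--         "%3e": ">",
--         "%3f": "?",
--         "%5b": "[",
--         "%5d": "]",
--         "%e2%80%9c": "\u201c",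
--         "%e2%80%9d": "\u201d",
--     }
--
--     # One left-to-right scan instead of 18 sequential full-string replace passes.
--     out = []
--     i = 0
--     n = len(display_name)
--     while i < n:
--         for key, value in patterns.items():
--             if display_name.startswith(key, i):
--                 out.append(value)
--                 i += len(key)
--                 break
--         else:
--             out.append(display_name[i])
--             i += 1
--     return "".join(out)
-- ===== Notes on version B (the rewrite author's own statement) =====
-- stated objective: alternative
-- what changed: A runs 18 sequential full-string str.replace passes (one per escape key); B makes a single left-to-right scan that at each position emits the decoding of the first matching key (or copies the character), which is provably the same result because no replacement value can take part in any key occurrence.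
import Mathlib
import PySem

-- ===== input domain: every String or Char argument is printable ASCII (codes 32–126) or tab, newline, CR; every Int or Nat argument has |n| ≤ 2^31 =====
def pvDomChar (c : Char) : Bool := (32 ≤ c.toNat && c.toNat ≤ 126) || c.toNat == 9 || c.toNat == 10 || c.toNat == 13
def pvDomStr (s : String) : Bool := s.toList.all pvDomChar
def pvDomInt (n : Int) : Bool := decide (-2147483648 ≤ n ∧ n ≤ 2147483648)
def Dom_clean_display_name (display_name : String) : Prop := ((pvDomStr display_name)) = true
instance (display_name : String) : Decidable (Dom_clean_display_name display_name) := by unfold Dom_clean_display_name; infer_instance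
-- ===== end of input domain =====

-- B replaces A's 18 sequential full-string replace passes by a single left-to-right scan
-- emitting the decoding of the first key matching at each position (objective: alternative).

-- ===== PORT A =====
-- the literal dict of escape patterns, as an association list in insertion order
def pvPatterns : List (String × String) :=
  [("%22", "\""), ("%23", "#"), ("%24", "$"), ("%26", "&"), ("%27", "'"),
   ("%28", "("), ("%29", ")"), ("%2c", ","), ("%2f", "/"), ("%3a", ":"),
   ("%3c", "<"), ("%3d", "="), ("%3e", ">"), ("%3f", "?"), ("%5b", "["),
   ("%5d", "]"), ("%e2%80%9c", "“"), ("%e2%80%9d", "”")]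

-- for key, value in patterns.items(): if key in dn: dn = dn.replace(key, value)
def clean_display_name (display_name : String) : String :=
  pvPatterns.foldl
    (fun dn kv => if PySem.Str.isIn kv.1 dn then PySem.Str.replace dn kv.1 kv.2 else dn)
    display_name

-- ===== PORT B =====
-- B's patterns dict, on the code-point level (same pairs, same order)
def pvTbl : List (List Char × List Char) :=
  [(['%','2','2'], ['"']), (['%','2','3'], ['#']), (['%','2','4'], ['$']),
   (['%','2','6'], ['&']), (['%','2','7'], ['\'']), (['%','2','8'], ['(']),
   (['%','2','9'], [')']), (['%','2','c'], [',']), (['%','2','f'], ['/']),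
   (['%','3','a'], [':']), (['%','3','c'], ['<']), (['%','3','d'], ['=']),
   (['%','3','e'], ['>']), (['%','3','f'], ['?']), (['%','5','b'], ['[']),
   (['%','5','d'], [']']),
   (['%','e','2','%','8','0','%','9','c'], ['“']),
   (['%','e','2','%','8','0','%','9','d'], ['”'])]

-- the while-loop of Source B: at each position emit the value of the first key that
-- matches there (for … else), otherwise copy the character and advance by one
def pvScan : List Char → List Char
  | [] => []
  | c :: t =>
    match pvTbl.find? (fun kv => kv.1.isPrefixOf (c :: t)) with
    | some kv => kv.2 ++ pvScan (t.drop (kv.1.length - 1))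
    | none => c :: pvScan t
termination_by s => s.length
decreasing_by all_goals simp only [List.length_drop, List.length_cons]; omega

def clean_display_name_alt (display_name : String) : String :=
  String.ofList (pvScan display_name.toList)

-- ===== PRECONDITION & SPEC =====
def Spec_clean_display_name (display_name : String) (out : String) : Prop := out = clean_display_name_alt display_name
instance (display_name : String) (out : String) : Decidable (Spec_clean_display_name display_name out) := by unfold Spec_clean_display_name; infer_instance

-- ===== CLAIM (what is proved, stated in full; the proofs are below) =====
def Claim_equal_clean_display_name : Prop := ∀ (display_name : String), Dom_clean_display_name display_name → Spec_clean_display_name display_name (clean_display_name display_name)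

-- ===== LEMMAS AND PROOFS =====

-- the alphabet of characters occurring in the 18 keys; no replacement value is in it
def pvKA : List Char := ['%','0','2','3','4','5','6','7','8','9','a','b','c','d','e','f']

-- window condition: k matches nowhere starting strictly inside w (nor at position 0)
def pvSCB (k w : List Char) : Bool :=
  (List.range w.length).all (fun m => !((k.take (w.length - m)).isPrefixOf (w.drop m)))

-- Bool-level pairwise check for the window condition
def pvPairwiseB : List (List Char × List Char) → Bool
  | [] => true
  | a :: l => l.all (fun b => pvSCB a.1 b.1) && pvPairwiseB l

-- concrete facts about the 18-entry table, evaluated by rfl/decide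
lemma pvTblB_ne_nil : pvTbl.all (fun kv => !kv.1.isEmpty) = true := by rfl
lemma pvTblB_head : pvTbl.all (fun kv => kv.1.head? == some '%') = true := by rfl
lemma pvTblB_alpha : pvTbl.all (fun kv => kv.1.all (fun ch => pvKA.contains ch)) = true := by rfl
lemma pvTblB_vals : pvTbl.all (fun kv => kv.2.length == 1 && kv.2.all (fun d => !pvKA.contains d)) = true := by rfl
lemma pvTblB_pairwise : pvPairwiseB pvTbl = true := by rfl
lemma pvPct_mem : '%' ∈ pvKA := by decide
lemma pvTbl_map : pvPatterns.map (fun kv => (kv.1.toList, kv.2.toList)) = pvTbl := by decide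

lemma pvTbl_keys_ne_nil : ∀ kv ∈ pvTbl, kv.1 ≠ [] := by
  intro kv hkv
  have h := List.all_eq_true.mp pvTblB_ne_nil kv hkv
  simpa using h

lemma pvTbl_keys_head : ∀ kv ∈ pvTbl, kv.1.head? = some '%' := by
  intro kv hkv
  have h := List.all_eq_true.mp pvTblB_head kv hkv
  simpa using h

lemma pvTbl_keys_alpha : ∀ kv ∈ pvTbl, ∀ ch ∈ kv.1, ch ∈ pvKA := by
  intro kv hkv ch hch
  have h := List.all_eq_true.mp pvTblB_alpha kv hkv
  exact List.contains_iff_mem.mp (List.all_eq_true.mp h ch hch)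

lemma pvTbl_vals : ∀ kv ∈ pvTbl, kv.2.length = 1 ∧ ∀ d ∈ kv.2, d ∉ pvKA := by
  intro kv hkv
  have h := List.all_eq_true.mp pvTblB_vals kv hkv
  rw [Bool.and_eq_true] at h
  refine ⟨by simpa using h.1, fun d hd => ?_⟩
  have h2 := List.all_eq_true.mp h.2 d hd
  simp only [Bool.not_eq_true'] at h2
  intro hmem
  rw [List.contains_iff_mem.mpr hmem] at h2
  exact absurd h2 (by simp)

lemma pvPairwiseB_pairwise : ∀ L, pvPairwiseB L = true → List.Pairwise (fun a b => pvSCB a.1 b.1 = true) L := by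
  intro L
  induction L with
  | nil => intro _; exact List.Pairwise.nil
  | cons a l ih =>
    intro h
    rw [pvPairwiseB, Bool.and_eq_true] at h
    exact List.Pairwise.cons (fun b hb => List.all_eq_true.mp h.1 b hb) (ih h.2)

lemma pvTbl_pairwise : List.Pairwise (fun a b => pvSCB a.1 b.1 = true) pvTbl :=
  pvPairwiseB_pairwise pvTbl pvTblB_pairwise

-- ---- unfolding lemmas for PySem.Chars.replace (nonempty pattern) ----

lemma pvGo_zero (old new l acc : List Char) :
    PySem.Chars.replace.go old new 0 l acc = acc.reverse ++ l := by rw [PySem.Chars.replace.go]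

lemma pvGo_succ_nil (old new acc : List Char) (fuel : Nat) :
    PySem.Chars.replace.go old new (fuel+1) [] acc = acc.reverse := by
  rw [PySem.Chars.replace.go]; omega

lemma pvGo_succ_cons (old new : List Char) (c : Char) (t acc : List Char) (fuel : Nat) :
    PySem.Chars.replace.go old new (fuel+1) (c::t) acc =
      if old.isPrefixOf (c::t) then PySem.Chars.replace.go old new fuel (List.drop old.length (c::t)) (new.reverse ++ acc)
      else PySem.Chars.replace.go old new fuel t (c :: acc) := by
  rw [PySem.Chars.replace.go]

lemma pvOld_len (old : List Char) (hold : old ≠ []) : 1 ≤ old.length := by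
  cases old with
  | nil => exact absurd rfl hold
  | cons a b => simp

lemma pvGo_fuel (old new : List Char) (hold : old ≠ []) :
    ∀ fuel, ∀ l acc : List Char, l.length ≤ fuel →
      PySem.Chars.replace.go old new fuel l acc =
        acc.reverse ++ PySem.Chars.replace.go old new l.length l [] := by
  intro fuel
  induction fuel using Nat.strong_induction_on with
  | _ fuel ih =>
    intro l acc hl
    match fuel, l with
    | 0, l =>
      have : l = [] := List.length_eq_zero_iff.mp (Nat.le_zero.mp hl)
      subst this
      simp [pvGo_zero]
    | fuel+1, [] =>
      rw [pvGo_succ_nil]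
      simp only [List.length_nil]
      rw [pvGo_zero]
      simp
    | fuel+1, c :: t =>
      rw [pvGo_succ_cons]
      simp only [List.length_cons]
      rw [pvGo_succ_cons]
      have h1 := pvOld_len old hold
      simp only [List.length_cons] at hl
      by_cases hp : old.isPrefixOf (c :: t)
      · simp only [hp, if_true]
        have hdl : (List.drop old.length (c :: t)).length = t.length + 1 - old.length := by
          rw [List.length_drop]; simp
        have hlen : (List.drop old.length (c :: t)).length ≤ fuel := by omega
        have hlen2 : (List.drop old.length (c :: t)).length ≤ t.length := by omega
        rw [ih fuel (by omega) _ _ hlen, ih t.length (by omega) _ _ hlen2]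
        simp
      · simp only [hp, Bool.false_eq_true, if_false]
        have hlt : t.length ≤ fuel := by omega
        rw [ih fuel (by omega) t (c :: acc) hlt, ih t.length (by omega) t [c] le_rfl]
        simp

lemma pvRep_nil (old new : List Char) (hold : old ≠ []) :
    PySem.Chars.replace [] old new = [] := by
  have hE : old.isEmpty = false := by simpa using hold
  rw [PySem.Chars.replace]
  simp only [hE, Bool.false_eq_true, if_false, List.length_nil]
  rw [pvGo_zero]
  simp

lemma pvRep_cons_neg (old new : List Char) (c : Char) (t : List Char)
    (h : old.isPrefixOf (c :: t) = false) :
    PySem.Chars.replace (c :: t) old new = c :: PySem.Chars.replace t old new := by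
  have hold : old ≠ [] := by
    intro he; subst he; simp [List.isPrefixOf] at h
  have hE : old.isEmpty = false := by simpa using hold
  rw [PySem.Chars.replace, PySem.Chars.replace]
  simp only [hE, Bool.false_eq_true, if_false, List.length_cons]
  rw [pvGo_succ_cons]
  simp only [h, Bool.false_eq_true, if_false]
  rw [pvGo_fuel old new hold t.length t [c] le_rfl]
  simp

lemma pvRep_cons_pos (old new l : List Char) (hold : old ≠ [])
    (h : old.isPrefixOf l = true) :
    PySem.Chars.replace l old new = new ++ PySem.Chars.replace (l.drop old.length) old new := by
  have hE : old.isEmpty = false := by simpa using hold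
  have h1 := pvOld_len old hold
  cases l with
  | nil =>
    exfalso
    have h2 := List.isPrefixOf_iff_prefix.mp h
    exact hold (List.prefix_nil.mp h2)
  | cons c t =>
    rw [PySem.Chars.replace, PySem.Chars.replace]
    simp only [hE, Bool.false_eq_true, if_false, List.length_cons]
    rw [pvGo_succ_cons]
    simp only [h, if_true]
    have hlen : (List.drop old.length (c :: t)).length ≤ t.length := by
      simp only [List.length_drop, List.length_cons]; omega
    rw [pvGo_fuel old new hold t.length _ _ hlen]
    simp

lemma pvRep_append_self (old new r : List Char) (hold : old ≠ []) :
    PySem.Chars.replace (old ++ r) old new = new ++ PySem.Chars.replace r old new := by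
  have h : old.isPrefixOf (old ++ r) = true :=
    List.isPrefixOf_iff_prefix.mpr (List.prefix_append old r)
  rw [pvRep_cons_pos old new _ hold h, List.drop_left]

lemma pvRep_of_not_isIn (old new s : List Char)
    (h : PySem.Chars.isIn old s = false) :
    PySem.Chars.replace s old new = s := by
  have hold : old ≠ [] := by
    intro he; subst he; rw [PySem.Chars.isIn_nil] at h; exact absurd h (by simp)
  induction s with
  | nil => exact pvRep_nil old new hold
  | cons c t ih =>
    have hinf : ¬ old <:+: (c :: t) := (PySem.Chars.isIn_eq_false_iff old (c :: t)).mp h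
    have hp : old.isPrefixOf (c :: t) = false := by
      by_contra hb
      have : old.isPrefixOf (c :: t) = true := by
        cases hx : old.isPrefixOf (c :: t) with
        | true => rfl
        | false => exact absurd hx hb
      exact hinf (List.isPrefixOf_iff_prefix.mp this).isInfix
    have ht : PySem.Chars.isIn old t = false := by
      rw [PySem.Chars.isIn_eq_false_iff]
      intro hi; exact hinf (hi.trans (List.suffix_cons c t).isInfix)
    rw [pvRep_cons_neg old new c t hp, ih ht]

-- ---- the unguarded sequential-replace chain ----

def pvChain (L : List (List Char × List Char)) (s : List Char) : List Char :=
  L.foldl (fun s kv => PySem.Chars.replace s kv.1 kv.2) s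

lemma pvChain_guard_elim (L : List (List Char × List Char)) (s : List Char) :
    L.foldl (fun s kv => if PySem.Chars.isIn kv.1 s then PySem.Chars.replace s kv.1 kv.2 else s) s
      = pvChain L s := by
  unfold pvChain
  congr 1
  funext s kv
  cases h : PySem.Chars.isIn kv.1 s with
  | true => simp
  | false => simp [pvRep_of_not_isIn kv.1 kv.2 s h]

-- bridge: A's String-level fold computes the guarded char-level fold
lemma pvBridge (L : List (String × String)) (s : String) :
    (L.foldl (fun dn kv => if PySem.Str.isIn kv.1 dn then PySem.Str.replace dn kv.1 kv.2 else dn) s).toList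
      = (L.map (fun kv => (kv.1.toList, kv.2.toList))).foldl
          (fun s kv => if PySem.Chars.isIn kv.1 s then PySem.Chars.replace s kv.1 kv.2 else s) s.toList := by
  induction L generalizing s with
  | nil => simp
  | cons kv L ih =>
    simp only [List.foldl_cons, List.map_cons]
    rw [ih]
    congr 1
    rw [PySem.Str.isIn_eq]
    cases h : PySem.Chars.isIn kv.1.toList s.toList with
    | true => simp [PySem.Str.toList_replace]
    | false => simp

-- ---- no replacement can create a key occurrence (values lie outside the key alphabet) ----

lemma pvNC (old : List Char) (hold : old ≠ []) (vc : Char) (hvc : vc ∉ pvKA)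
    (k' : List Char) (hk' : ∀ ch ∈ k', ch ∈ pvKA) :
    ∀ (s k'' : List Char), k'' ≠ [] → k'' <:+ k' → k''.isPrefixOf s = false →
      k''.isPrefixOf (PySem.Chars.replace s old [vc]) = false := by
  intro s
  induction s with
  | nil =>
    intro k'' hne _ _
    rw [pvRep_nil old [vc] hold]
    cases k'' with
    | nil => exact absurd rfl hne
    | cons a b => simp [List.isPrefixOf]
  | cons c t ih =>
    intro k'' hne hsuf hpre
    cases hp : old.isPrefixOf (c :: t) with
    | true =>
      rw [pvRep_cons_pos old [vc] (c :: t) hold hp]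
      cases k'' with
      | nil => exact absurd rfl hne
      | cons a b =>
        have ha : a ∈ pvKA := hk' a (hsuf.subset (by simp))
        have : a ≠ vc := by intro he; subst he; exact hvc ha
        simp [List.isPrefixOf, List.cons_append, this]
    | false =>
      rw [pvRep_cons_neg old [vc] c t hp]
      cases k'' with
      | nil => exact absurd rfl hne
      | cons a b =>
        by_cases hac : a = c
        · subst hac
          have hbt : b.isPrefixOf t = false := by
            simpa [List.isPrefixOf_cons₂] using hpre
          have hbne : b ≠ [] := by
            intro he; subst he; simp [List.isPrefixOf] at hbt
          have hbsuf : b <:+ k' := (List.suffix_cons a b).trans hsuf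
          have := ih b hbne hbsuf hbt
          simp [this]
        · simp [List.isPrefixOf_cons₂, hac]

-- ---- prefix window lemmas ----

lemma pvPrefixTake (k w X : List Char) (h : k.isPrefixOf (w ++ X) = true) :
    (k.take w.length).isPrefixOf w = true := by
  have hpre : k <+: w ++ X := List.isPrefixOf_iff_prefix.mp h
  have h1 : k.take w.length <+: w ++ X := (List.take_prefix _ k).trans hpre
  have h2 : (k.take w.length).length ≤ w.length := by simp
  exact List.isPrefixOf_iff_prefix.mpr ((List.isPrefix_append_of_length h2).mp h1)

lemma pvRep_append_windows (k v : List Char) :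
    ∀ (w X : List Char),
      (∀ m, m < w.length → (k.take (w.length - m)).isPrefixOf (w.drop m) = false) →
      PySem.Chars.replace (w ++ X) k v = w ++ PySem.Chars.replace X k v := by
  intro w
  induction w with
  | nil => intro X _; simp
  | cons c w' ih =>
    intro X hw
    have h0 : (k.take (w'.length + 1)).isPrefixOf (c :: w') = false := by
      have := hw 0 (by simp)
      simpa using this
    have hp : k.isPrefixOf ((c :: w') ++ X) = false := by
      cases hx : k.isPrefixOf ((c :: w') ++ X) with
      | false => rfl
      | true =>
        exfalso
        have := pvPrefixTake k (c :: w') X hx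
        simp only [List.length_cons] at this
        rw [h0] at this
        exact Bool.false_ne_true this
    rw [List.cons_append, pvRep_cons_neg k v c (w' ++ X) hp]
    rw [ih X (fun m hm => by have := hw (m+1) (by simp; omega); simpa using this)]
    simp

-- ---- fold peel lemmas ----

lemma pvChain_nil (L : List (List Char × List Char)) (hL : ∀ kv ∈ L, kv ∈ pvTbl) :
    pvChain L [] = [] := by
  induction L with
  | nil => rfl
  | cons kv L ih =>
    unfold pvChain at *
    simp only [List.foldl_cons]
    rw [pvRep_nil kv.1 kv.2 (pvTbl_keys_ne_nil kv (hL kv (by simp)))]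
    exact ih (fun a ha => hL a (by simp [ha]))

lemma pvChain_head (L : List (List Char × List Char)) (hL : ∀ kv ∈ L, kv ∈ pvTbl)
    (c : Char) (hc : c ≠ '%') : ∀ y, pvChain L (c :: y) = c :: pvChain L y := by
  induction L with
  | nil => intro y; rfl
  | cons kv L ih =>
    intro y
    have hmem := hL kv (by simp)
    have hhead := pvTbl_keys_head kv hmem
    have hp : kv.1.isPrefixOf (c :: y) = false := by
      cases h1 : kv.1 with
      | nil => rw [h1] at hhead; simp at hhead
      | cons a b =>
        rw [h1] at hhead
        simp only [List.head?_cons, Option.some.injEq] at hhead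
        subst hhead
        simp [List.isPrefixOf_cons₂, Ne.symm hc]
    unfold pvChain at *
    simp only [List.foldl_cons]
    rw [pvRep_cons_neg kv.1 kv.2 c y hp]
    exact ih (fun a ha => hL a (by simp [ha])) _

lemma pvChain_inv (L : List (List Char × List Char)) (hL : ∀ kv ∈ L, kv ∈ pvTbl) :
    ∀ c t, (∀ kv ∈ pvTbl, kv.1.isPrefixOf (c :: t) = false) →
      pvChain L (c :: t) = c :: pvChain L t := by
  induction L with
  | nil => intro c t _; rfl
  | cons kv L ih =>
    intro c t h
    have hmem := hL kv (by simp)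
    have hp := h kv hmem
    obtain ⟨hlen1, hvout⟩ := pvTbl_vals kv hmem
    obtain ⟨vc, hvc⟩ := List.length_eq_one_iff.mp hlen1
    have hkne := pvTbl_keys_ne_nil kv hmem
    unfold pvChain at *
    simp only [List.foldl_cons]
    rw [pvRep_cons_neg kv.1 kv.2 c t hp]
    have hnew : ∀ k' ∈ pvTbl, k'.1.isPrefixOf (c :: PySem.Chars.replace t kv.1 kv.2) = false := by
      intro k' hk'
      have hthis := pvNC kv.1 hkne vc (hvout vc (by simp [hvc])) k'.1
        (pvTbl_keys_alpha k' hk') (c :: t) k'.1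
        (pvTbl_keys_ne_nil k' hk') List.suffix_rfl (h k' hk')
      rw [← hvc, pvRep_cons_neg kv.1 kv.2 c t hp] at hthis
      exact hthis
    exact ih (fun a ha => hL a (by simp [ha])) c (PySem.Chars.replace t kv.1 kv.2) hnew

lemma pvChain_windows (w : List Char) :
    ∀ (l₁ : List (List Char × List Char)),
      (∀ a ∈ l₁, a.1 ≠ [] ∧ pvSCB a.1 w = true) →
      ∀ X, pvChain l₁ (w ++ X) = w ++ pvChain l₁ X := by
  intro l₁
  induction l₁ with
  | nil => intro _ X; rfl
  | cons kv L ih =>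
    intro h X
    obtain ⟨-, hscb⟩ := h kv (by simp)
    unfold pvChain at *
    simp only [List.foldl_cons]
    rw [pvRep_append_windows kv.1 kv.2 w X (by
      intro m hm
      have := (List.all_eq_true.mp hscb) m (List.mem_range.mpr hm)
      simpa using this)]
    exact ih (fun a ha => h a (by simp [ha])) _

-- ---- the main induction ----

lemma pvMain : ∀ n (s : List Char), s.length ≤ n → pvChain pvTbl s = pvScan s := by
  intro n
  induction n with
  | zero =>
    intro s hs
    have : s = [] := List.length_eq_zero_iff.mp (Nat.le_zero.mp hs)
    subst this
    rw [pvChain_nil pvTbl (fun _ h => h), pvScan]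
  | succ n ih =>
    intro s hs
    cases s with
    | nil => rw [pvChain_nil pvTbl (fun _ h => h), pvScan]
    | cons c t =>
      rw [pvScan.eq_def]
      cases hfind : pvTbl.find? (fun kv => kv.1.isPrefixOf (c :: t)) with
      | none =>
        simp only [hfind]
        have hall : ∀ kv ∈ pvTbl, kv.1.isPrefixOf (c :: t) = false := by
          intro kv hkv
          exact Bool.eq_false_iff.mpr (by simpa using List.find?_eq_none.mp hfind kv hkv)
        rw [pvChain_inv pvTbl (fun _ h => h) c t hall]
        simp only [List.length_cons] at hs
        rw [ih t (by omega)]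
      | some kv =>
        simp only [hfind]
        obtain ⟨hpkv, l₁, l₂, htbl, hbefore⟩ := List.find?_eq_some_iff_append.mp hfind
        have hmem : kv ∈ pvTbl := by rw [htbl]; simp
        have hkne := pvTbl_keys_ne_nil kv hmem
        obtain ⟨hlen1, hvout⟩ := pvTbl_vals kv hmem
        obtain ⟨vc, hvc⟩ := List.length_eq_one_iff.mp hlen1
        obtain ⟨rest, hrest⟩ := List.isPrefixOf_iff_prefix.mp hpkv
        -- decompose the key: it starts with the current character c
        obtain ⟨k', hk'⟩ : ∃ k', kv.1 = c :: k' := by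
          cases hx : kv.1 with
          | nil => exact absurd hx hkne
          | cons a b =>
            have h' := hrest
            rw [hx, List.cons_append] at h'
            injection h' with h1 _
            exact ⟨b, by rw [h1]⟩
        have ht : t = k' ++ rest := by
          have h' := hrest
          rw [hk', List.cons_append] at h'
          injection h' with _ h2
          exact h2.symm
        have hdrop : t.drop (kv.1.length - 1) = rest := by
          rw [ht, hk']
          simp
        -- side conditions for the keys before kv
        have hl₁ : ∀ a ∈ l₁, a.1 ≠ [] ∧ pvSCB a.1 kv.1 = true := by
          intro a ha
          have hamem : a ∈ pvTbl := by rw [htbl]; simp [ha]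
          refine ⟨pvTbl_keys_ne_nil a hamem, ?_⟩
          have hpw := pvTbl_pairwise
          rw [htbl] at hpw
          have := (List.pairwise_append.mp hpw).2.2 a ha kv (by simp)
          exact this
        have hvcout : vc ∉ pvKA := hvout vc (by simp [hvc])
        have hvcne : vc ≠ '%' := by intro he; subst he; exact hvcout pvPct_mem
        -- compute the chain
        have hsplit : pvChain pvTbl (c :: t) = pvChain l₂ (PySem.Chars.replace (pvChain l₁ (c :: t)) kv.1 kv.2) := by
          rw [htbl]
          unfold pvChain
          rw [List.foldl_append]
          simp
        have hstep1 : pvChain l₁ (c :: t) = kv.1 ++ pvChain l₁ rest := by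
          have : (c :: t) = kv.1 ++ rest := by rw [hk', ht]; simp
          rw [this]
          exact pvChain_windows kv.1 l₁ hl₁ rest
        have hstep2 : PySem.Chars.replace (kv.1 ++ pvChain l₁ rest) kv.1 kv.2
            = vc :: PySem.Chars.replace (pvChain l₁ rest) kv.1 kv.2 := by
          rw [pvRep_append_self kv.1 kv.2 _ hkne, hvc]
          simp
        have hstep3 : pvChain l₂ (vc :: PySem.Chars.replace (pvChain l₁ rest) kv.1 kv.2)
            = vc :: pvChain l₂ (PySem.Chars.replace (pvChain l₁ rest) kv.1 kv.2) := by
          exact pvChain_head l₂ (fun a ha => by rw [htbl]; simp [ha]) vc hvcne _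
        have hre : pvChain l₂ (PySem.Chars.replace (pvChain l₁ rest) kv.1 kv.2) = pvChain pvTbl rest := by
          rw [htbl]
          unfold pvChain
          rw [List.foldl_append]
          simp
        have hrestlen : rest.length ≤ n := by
          have h' : t.length = k'.length + rest.length := by rw [ht]; simp
          simp only [List.length_cons] at hs
          omega
        rw [hsplit, hstep1, hstep2, hstep3, hre, ih rest hrestlen, hdrop, hvc]
        simp

-- ===== VERDICT (by name: the statement is the Claim_ definition above) =====
theorem clean_display_name_spec : Claim_equal_clean_display_name := by
  intro display_name _
  unfold Spec_clean_display_name clean_display_name clean_display_name_alt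
  have h1 := pvBridge pvPatterns display_name
  rw [pvTbl_map, pvChain_guard_elim, pvMain display_name.toList.length display_name.toList le_rfl] at h1
  have h2 := congrArg String.ofList h1
  rwa [String.ofList_toList] at h2
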